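-- pv_equiv track=rewrite | github.com/MrBrantCode/unitest_baseline | mut_generate/mist_train_cf/cf_65812/solution.py | prime_hex_count
-- ===== SOURCE A (Python) =====
-- def prime_hex_count(hex_input):
--     count = 0
--     consecutive = False
--     prime_hex_values = ["2", "3", "5", "7", "B", "D", "F"]
--     for i in range(len(hex_input)):
--         if hex_input[i] in prime_hex_values:
--             count += 1
--             if i > 0 and hex_input[i-1] in prime_hex_values:
--                 consecutive = True
--     return count * 2 if consecutive else count
-- ===== SOURCE B (Python) =====
-- def prime_hex_count(hex_input):
--     # Run-length decomposition: collect the lengths of maximal runs of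
--     # prime hex digits, then aggregate: total = sum of run lengths,
--     # doubled iff some run has length >= 2.
--     primes = "2357BDF"
--     runs = []
--     n = 0
--     for c in hex_input:
--         if c in primes:
--             n += 1
--         elif n:
--             runs.append(n)
--             n = 0
--     if n:
--         runs.append(n)
--     total = sum(runs)
--     return total * 2 if any(r > 1 for r in runs) else total
-- ===== Notes on version B (the rewrite author's own statement) =====
-- stated objective: alternative
-- what changed: Replaces A's index-based loop (per-character count plus a look-back at position i-1) by a run-length decomposition: the string is grouped into maximal runs of prime digits, the answer is the sum of the run lengths, doubled iff some run has length >= 2.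
import Mathlib
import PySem

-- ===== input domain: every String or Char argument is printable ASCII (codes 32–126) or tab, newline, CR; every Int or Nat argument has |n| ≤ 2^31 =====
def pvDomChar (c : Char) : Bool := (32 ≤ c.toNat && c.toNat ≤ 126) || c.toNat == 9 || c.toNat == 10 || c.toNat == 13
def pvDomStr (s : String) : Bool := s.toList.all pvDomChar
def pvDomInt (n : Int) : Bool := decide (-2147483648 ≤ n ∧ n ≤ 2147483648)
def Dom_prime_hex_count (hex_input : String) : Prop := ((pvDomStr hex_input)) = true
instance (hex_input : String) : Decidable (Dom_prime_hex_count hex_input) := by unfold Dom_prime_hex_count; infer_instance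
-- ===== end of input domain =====

-- B replaces A's index-based look-back loop by a run-length decomposition (maximal prime-digit runs, sum doubled iff a run has length >= 2); objective: alternative.


-- ===== PORT A =====
-- A's loop body: for i in range(len): if hex[i] in primes: count += 1; if i>0 and hex[i-1] in primes: consecutive = True
def phcStepA (cs : List Char) (s : Int × Bool) (i : Nat) : Int × Bool :=
  if ['2','3','5','7','B','D','F'].contains (cs.getD i ' ') then
    if decide (0 < i) && ['2','3','5','7','B','D','F'].contains (cs.getD (i - 1) ' ') then
      (s.1 + 1, true)
    else
      (s.1 + 1, s.2)
  else s

def prime_hex_count (hex_input : String) : Int :=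
  let cs := hex_input.toList
  let st := (List.range cs.length).foldl (phcStepA cs) (0, false)
  if st.2 then st.1 * 2 else st.1

-- ===== PORT B =====
def phcPrime (c : Char) : Bool := ['2','3','5','7','B','D','F'].contains c

-- B's loop: collect lengths of maximal runs of prime digits (n = length of the current open run)
def phcRuns : List Char → Nat → List Nat
  | [], n => if n ≠ 0 then [n] else []
  | c :: cs, n =>
    if phcPrime c then phcRuns cs (n + 1)
    else if n ≠ 0 then n :: phcRuns cs 0
    else phcRuns cs 0

def prime_hex_count_alt (hex_input : String) : Int :=
  let runs := phcRuns hex_input.toList 0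
  let total : Int := (runs.sum : Int)
  if runs.any (fun r => decide (1 < r)) then total * 2 else total

-- ===== PRECONDITION & SPEC =====
def Spec_prime_hex_count (hex_input : String) (out : Int) : Prop := out = prime_hex_count_alt hex_input
instance (hex_input : String) (out : Int) : Decidable (Spec_prime_hex_count hex_input out) := by unfold Spec_prime_hex_count; infer_instance

-- ===== CLAIM (what is proved, stated in full; the proofs are below) =====
def Claim_equal_prime_hex_count : Prop := ∀ (hex_input : String), Dom_prime_hex_count hex_input → Spec_prime_hex_count hex_input (prime_hex_count hex_input)

-- ===== LEMMAS AND PROOFS =====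

-- the adjacent-pair list of a snoc
theorem phc_zip_tail_snoc (cs : List Char) (c : Char) :
    (cs ++ [c]).zip (cs ++ [c]).tail
      = cs.zip cs.tail ++ (if cs.length = 0 then [] else [(cs.getD (cs.length - 1) ' ', c)]) := by
  induction cs with
  | nil => simp
  | cons d cs ih =>
    cases cs with
    | nil => simp
    | cons e cs' =>
      simp only [List.cons_append, List.tail_cons, List.zip_cons_cons] at ih ⊢
      rw [ih]
      simp only [List.length_cons, Nat.add_sub_cancel, List.getD]
      rfl

-- A's fold over range indices on a snoc ignores the last element for the first cs.length steps
theorem phc_fold_extend (cs : List Char) (c : Char) (s : Int × Bool) :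
    (List.range cs.length).foldl (phcStepA (cs ++ [c])) s
      = (List.range cs.length).foldl (phcStepA cs) s := by
  apply List.foldl_ext
  intro acc i hi
  rw [List.mem_range] at hi
  unfold phcStepA
  rw [List.getD_append _ _ _ _ hi]
  rcases Nat.eq_zero_or_pos i with h0 | h0
  · simp [h0]
  · rw [List.getD_append _ _ _ _ (by omega)]

-- characterisation of A's fold: count = filtered length, flag = any adjacent prime pair
theorem phc_fold_eq (cs : List Char) :
    (List.range cs.length).foldl (phcStepA cs) (0, false)
      = (((cs.filter phcPrime).length : Int),
         (cs.zip cs.tail).any (fun p => phcPrime p.1 && phcPrime p.2)) := by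
  induction cs using List.reverseRecOn with
  | nil => simp
  | append_singleton cs c ih =>
    rw [List.length_append, List.length_singleton, List.range_succ, List.foldl_append,
        phc_fold_extend, ih, phc_zip_tail_snoc]
    simp only [List.foldl_cons, List.foldl_nil]
    unfold phcStepA phcPrime
    rcases Nat.eq_zero_or_pos cs.length with h0 | h0
    · obtain rfl : cs = [] := List.length_eq_zero_iff.mp h0
      simp
      split_ifs <;> simp_all
    · have hlt : cs.length - 1 < cs.length := by omega
      rw [List.getD_append_right _ _ _ _ (Nat.le_refl _),
          List.getD_append _ _ _ _ hlt]
      simp only [Nat.sub_self, List.getD_cons_zero, Nat.pos_iff_ne_zero.mp h0]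
      split_ifs with h1 h2 <;>
        simp_all [List.filter_append, List.any_append]

-- sum of the run lengths = open-run length + number of prime digits
theorem phcRuns_sum (cs : List Char) (n : Nat) :
    (phcRuns cs n).sum = n + (cs.filter phcPrime).length := by
  induction cs generalizing n with
  | nil => unfold phcRuns; split_ifs <;> simp_all
  | cons c cs ih =>
    unfold phcRuns
    by_cases hp : phcPrime c
    · simp [hp, ih]; omega
    · split_ifs <;> simp_all <;> omega

-- some run has length ≥ 2  ⟺  the open run already does, or it extends, or some adjacent pair is prime
theorem phcRuns_any (cs : List Char) (n : Nat) :
    (phcRuns cs n).any (fun r => decide (1 < r))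
      = (decide (1 < n) || (decide (0 < n) && phcPrime (cs.headD ' '))
         || (cs.zip cs.tail).any (fun p => phcPrime p.1 && phcPrime p.2)) := by
  induction cs generalizing n with
  | nil =>
    unfold phcRuns
    split_ifs with h <;> simp_all [phcPrime] <;> omega
  | cons c cs ih =>
    unfold phcRuns
    by_cases hp : phcPrime c
    · rw [if_pos hp, ih]
      cases cs with
      | nil =>
        by_cases h1 : 1 < n <;> by_cases h0 : 0 < n <;> simp_all [phcPrime] <;> omega
      | cons d cs' =>
        simp only [List.tail_cons, List.zip_cons_cons, List.any_cons, List.headD_cons, hp]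
        by_cases hd : phcPrime d <;> by_cases h1 : 1 < n <;> by_cases h0 : 0 < n <;>
          simp_all <;> omega
    · rw [if_neg hp]
      have hzip : ((c :: cs).zip (c :: cs).tail).any (fun p => phcPrime p.1 && phcPrime p.2)
          = (cs.zip cs.tail).any (fun p => phcPrime p.1 && phcPrime p.2) := by
        cases cs with
        | nil => simp
        | cons d cs' => simp [hp]
      rw [hzip]
      split_ifs with hn
      · simp only [List.any_cons, ih]
        simp [hp]
      · rw [ih]
        simp_all

-- ===== VERDICT (by name: the statement is the Claim_ definition above) =====
theorem prime_hex_count_spec : Claim_equal_prime_hex_count := by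
  intro hex_input _
  unfold Spec_prime_hex_count prime_hex_count prime_hex_count_alt
  simp only [phc_fold_eq, phcRuns_sum, phcRuns_any]
  simp
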